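-- pv_equiv track=rewrite | github.com/VincenzoImp/Python-Exercises | 2018-19/homework02bis/program01.py | trovalinee
-- ===== SOURCE A (Python) =====
-- def trovalinee(righe):
--     linee = []
--     for riga in righe:
--         if not riga: continue
--         found = False
--         for linea in linee:
--             if linea[-1] == riga[0]:
--                 linea += riga[1:]
--                 found = True
--         if not found:
--             linee.append(riga)
--     #pprint(linee)
--     return linee
-- ===== SOURCE B (Python) =====
-- # Alternative implementation: index lines by their current last element in a dict of
-- # index-buckets; each riga touches exactly the bucketed lines and re-buckets them,
-- # instead of scanning every accumulated line. Note: unlike A, B does not mutate the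
-- # input sublists in place (the return value is identical).
-- def trovalinee(righe):
--     linee = []
--     buckets = {}  # current last element -> list of indices into linee
--     for riga in righe:
--         if not riga:
--             continue
--         idxs = buckets.get(riga[0])
--         if idxs:
--             tail = riga[1:]
--             if tail:
--                 for i in idxs:
--                     linee[i] = linee[i] + tail
--                 buckets[riga[0]] = []
--                 buckets.setdefault(tail[-1], []).extend(idxs)
--         else:
--             buckets.setdefault(riga[-1], []).append(len(linee))
--             linee.append(list(riga))
--     return linee
-- ===== Notes on version B (the rewrite author's own statement) =====
-- stated objective: alternative
-- what changed: Replaces A's inner scan of every accumulated line per input row with a dict bucketing line indices by their current last element, so each row only touches the lines it actually extends.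
import Mathlib
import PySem

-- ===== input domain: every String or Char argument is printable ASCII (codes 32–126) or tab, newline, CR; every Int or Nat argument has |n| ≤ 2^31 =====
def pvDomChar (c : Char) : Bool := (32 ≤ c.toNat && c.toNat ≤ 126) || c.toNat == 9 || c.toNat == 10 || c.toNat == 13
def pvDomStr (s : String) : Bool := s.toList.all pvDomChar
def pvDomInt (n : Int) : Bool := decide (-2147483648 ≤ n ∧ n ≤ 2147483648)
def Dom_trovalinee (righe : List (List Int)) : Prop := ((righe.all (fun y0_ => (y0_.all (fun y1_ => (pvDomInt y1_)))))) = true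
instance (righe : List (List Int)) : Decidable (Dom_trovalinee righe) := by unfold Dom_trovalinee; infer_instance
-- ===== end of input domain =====

-- B replaces A's rescan of every accumulated line per input row by a dict bucketing
-- line indices by their current last element (objective: alternative).
-- A mutates the input sublists in place (B does not); the equivalence is about the return value.

-- ===== PORT A =====
-- loop body of A's outer 'for riga in righe' (the inner 'for linea in linee' is the foldl carrying (new list, found))
def pvStepA (linee : List (List Int)) (riga : List Int) : List (List Int) :=
  if riga = [] then linee
  else
    let p := linee.foldl (fun (st : List (List Int) × Bool) linea =>
      if PySem.List.pyGet? linea (-1) = PySem.List.pyGet? riga 0 then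
        (st.1 ++ [linea ++ PySem.List.slice riga (some 1) none], true)
      else (st.1 ++ [linea], st.2)) ([], false)
    if p.2 then p.1 else p.1 ++ [riga]

def trovalinee (righe : List (List Int)) : List (List Int) :=
  righe.foldl pvStepA []

-- ===== PORT B =====
-- loop body of B's 'for riga in righe'; state = (linee, buckets: last element -> indices)
def pvStepB (st : List (List Int) × PySem.Dict Int (List Nat)) (riga : List Int) : List (List Int) × PySem.Dict Int (List Nat) :=
  match riga with
  | [] => st
  | r0 :: rest =>
    let idxs := st.2.getD r0 []
    if idxs ≠ [] then
      if h : rest ≠ [] then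
        let linee' := idxs.foldl (fun ls i => ls.set i (ls.getD i [] ++ rest)) st.1
        let d1 := st.2.insert r0 ([] : List Nat)
        let w := rest.getLast h
        (linee', d1.insert w (d1.getD w [] ++ idxs))
      else st
    else
      let lst := (r0 :: rest).getLast (by simp)
      (st.1 ++ [r0 :: rest], st.2.insert lst (st.2.getD lst [] ++ [st.1.length]))

def trovalinee_alt (righe : List (List Int)) : List (List Int) :=
  (righe.foldl pvStepB ([], PySem.Dict.empty)).1

-- ===== PRECONDITION & SPEC =====
def Spec_trovalinee (righe : List (List Int)) (out : List (List Int)) : Prop := out = trovalinee_alt righe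
instance (righe : List (List Int)) (out : List (List Int)) : Decidable (Spec_trovalinee righe out) := by unfold Spec_trovalinee; infer_instance

-- ===== CLAIM (what is proved, stated in full; the proofs are below) =====
def Claim_equal_trovalinee : Prop := ∀ (righe : List (List Int)), Dom_trovalinee righe → Spec_trovalinee righe (trovalinee righe)

-- ===== LEMMAS AND PROOFS =====

-- buckets invariant: bucket v holds exactly the (duplicate-free) indices of lines whose last element is v
def pvINV (linee : List (List Int)) (d : PySem.Dict Int (List Nat)) : Prop :=
  ∀ v : Int, (d.getD v []).Nodup ∧
    ∀ i : Nat, i ∈ d.getD v [] ↔ (i < linee.length ∧ (linee.getD i []).getLast? = some v)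

-- shape of A's inner loop: append-extend each matching line, 'found' is an any
lemma pv_innerA (tail : List Int) (c : List Int → Prop) [DecidablePred c] :
    ∀ (linee acc : List (List Int)) (f : Bool),
    linee.foldl (fun (st : List (List Int) × Bool) linea =>
        if c linea then (st.1 ++ [linea ++ tail], true) else (st.1 ++ [linea], st.2)) (acc, f)
    = (acc ++ linee.map (fun l => if c l then l ++ tail else l),
       f || linee.any (fun l => decide (c l))) := by
  intro linee
  induction linee with
  | nil => intro acc f; simp
  | cons x xs ih =>
    intro acc f
    by_cases hx : c x <;> simp [List.foldl_cons, hx, ih]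

-- B's index loop: length is preserved
lemma pv_set_length (tail : List Int) :
    ∀ (idxs : List Nat) (L : List (List Int)),
    (idxs.foldl (fun ls i => ls.set i (ls.getD i [] ++ tail)) L).length = L.length := by
  intro idxs
  induction idxs with
  | nil => intro L; simp
  | cons i rest ih => intro L; rw [List.foldl_cons, ih]; simp

-- B's index loop, pointwise: each listed (duplicate-free, in-range) index gets the tail appended once
lemma pv_set_getD (tail : List Int) :
    ∀ (idxs : List Nat) (L : List (List Int)), idxs.Nodup → (∀ i ∈ idxs, i < L.length) →
    ∀ j, (idxs.foldl (fun ls i => ls.set i (ls.getD i [] ++ tail)) L).getD j []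
      = if j ∈ idxs then L.getD j [] ++ tail else L.getD j [] := by
  intro idxs
  induction idxs with
  | nil => intro L _ _ j; simp
  | cons i rest ih =>
    intro L hnd hlt j
    have hi : i < L.length := hlt i (by simp)
    have hnotin : i ∉ rest := (List.nodup_cons.mp hnd).1
    have hrest : rest.Nodup := (List.nodup_cons.mp hnd).2
    have hlt' : ∀ k ∈ rest, k < (L.set i (L.getD i [] ++ tail)).length := by
      intro k hk; simpa using hlt k (by simp [hk])
    rw [List.foldl_cons, ih _ hrest hlt' j]
    by_cases hjr : j ∈ rest
    · have hji : j ≠ i := fun h => hnotin (h ▸ hjr)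
      rw [List.getD_eq_getElem?_getD, List.getD_eq_getElem?_getD, List.getElem?_set_ne (Ne.symm hji)]
      simp [hjr]
    · by_cases hji : j = i
      · subst hji
        simp [hjr, List.getElem?_set_self hi, List.getD_eq_getElem?_getD]
      · rw [List.getD_eq_getElem?_getD, List.getD_eq_getElem?_getD, List.getElem?_set_ne (fun h => hji h.symm)]
        simp [hjr, hji]

-- two lists agree when their lengths and all getD values do
lemma pv_ext (L1 L2 : List (List Int)) (hl : L1.length = L2.length)
    (h : ∀ j, L1.getD j [] = L2.getD j []) : L1 = L2 := by
  apply List.ext_getElem hl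
  intro j h1 h2
  have := h j
  rwa [List.getD_eq_getElem _ _ h1, List.getD_eq_getElem _ _ h2] at this

-- A's inner-loop result, written with the condition in getLast? form
lemma pv_stepA_cons (linee : List (List Int)) (r0 : Int) (rest : List Int) :
    pvStepA linee (r0 :: rest) =
      (if (linee.any fun l => decide (l.getLast? = some r0)) = true then
        linee.map (fun l => if l.getLast? = some r0 then l ++ rest else l)
      else linee.map (fun l => if l.getLast? = some r0 then l ++ rest else l) ++ [r0 :: rest]) := by
  have hs : PySem.List.slice (r0 :: rest) (some 1) none = rest := by
    rw [PySem.List.slice_from]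
    · simp
    · norm_num
  unfold pvStepA
  rw [if_neg (by simp)]
  simp only [PySem.List.pyGet?_neg_one, PySem.List.pyGet?_zero_cons, hs]
  rw [pv_innerA rest (fun l => l.getLast? = some r0) linee [] false]
  simp

-- found ↔ the bucket of r0 is nonempty
lemma pv_found (linee : List (List Int)) (r0 : Int) (d : PySem.Dict Int (List Nat))
    (hInv : pvINV linee d) :
    (linee.any fun l => decide (l.getLast? = some r0)) = true ↔ d.getD r0 [] ≠ [] := by
  have hchar := (hInv r0).2
  rw [List.any_eq_true]
  constructor
  · rintro ⟨l, hl, hc⟩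
    obtain ⟨i, hi, rfl⟩ := List.mem_iff_getElem.mp hl
    have hmem : i ∈ d.getD r0 [] := (hchar i).mpr
      ⟨hi, by rw [List.getD_eq_getElem _ _ hi]; exact of_decide_eq_true hc⟩
    intro hnil; rw [hnil] at hmem; simp at hmem
  · intro hne
    obtain ⟨i, hi⟩ := List.exists_mem_of_ne_nil _ hne
    obtain ⟨hlt, hlast⟩ := (hchar i).mp hi
    exact ⟨linee.getD i [], by rw [List.getD_eq_getElem _ _ hlt]; exact List.getElem_mem hlt,
      decide_eq_true hlast⟩


-- appending a fresh line: its index joins the bucket of its last element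
lemma pv_inv_append (linee : List (List Int)) (d : PySem.Dict Int (List Nat)) (hInv : pvINV linee d)
    (r0 : Int) (rest : List Int) :
    pvINV (linee ++ [r0 :: rest])
      (d.insert ((r0 :: rest).getLast (by simp))
        (d.getD ((r0 :: rest).getLast (by simp)) [] ++ [linee.length])) := by
  set lst := (r0 :: rest).getLast (by simp) with hlstdef
  have hlast : (r0 :: rest).getLast? = some lst := List.getLast?_eq_some_getLast (by simp)
  have hchar := fun v => (hInv v).2
  have hnd := fun v => (hInv v).1
  have hlt : ∀ v i, i ∈ d.getD v [] → i < linee.length := fun v i h => ((hchar v i).mp h).1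
  intro v
  have hgd : (d.insert lst (d.getD lst [] ++ [linee.length])).getD v []
      = if v = lst then d.getD lst [] ++ [linee.length] else d.getD v [] := by
    rw [PySem.Dict.getD_insert]
  constructor
  · rw [hgd]
    by_cases hv : v = lst
    · rw [if_pos hv]
      refine List.Nodup.append (hnd lst) (List.nodup_singleton _) ?_
      intro a ha hb
      rw [List.mem_singleton] at hb
      subst hb
      exact absurd (hlt lst _ ha) (lt_irrefl _)
    · rw [if_neg hv]; exact hnd v
  · intro i
    rw [hgd]
    by_cases hv : v = lst
    · subst hv
      rw [if_pos rfl, List.mem_append, List.mem_singleton]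
      constructor
      · rintro (hi | rfl)
        · obtain ⟨h1, h2⟩ := (hchar lst i).mp hi
          exact ⟨by simp; omega, by rw [List.getD_append _ _ _ _ h1]; exact h2⟩
        · refine ⟨by simp, ?_⟩
          rw [show (linee ++ [r0 :: rest]).getD linee.length [] = r0 :: rest by simp, hlast]
      · rintro ⟨h1, h2⟩
        simp only [List.length_append, List.length_cons, List.length_nil] at h1
        rcases Nat.lt_succ_iff_lt_or_eq.mp (by omega : i < linee.length + 1) with h1' | rfl
        · exact Or.inl ((hchar lst i).mpr ⟨h1', by rwa [List.getD_append _ _ _ _ h1'] at h2⟩)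
        · exact Or.inr rfl
    · rw [if_neg hv]
      constructor
      · intro hi
        obtain ⟨h1, h2⟩ := (hchar v i).mp hi
        exact ⟨by simp; omega, by rw [List.getD_append _ _ _ _ h1]; exact h2⟩
      · rintro ⟨h1, h2⟩
        simp only [List.length_append, List.length_cons, List.length_nil] at h1
        rcases Nat.lt_succ_iff_lt_or_eq.mp (by omega : i < linee.length + 1) with h1' | rfl
        · exact (hchar v i).mpr ⟨h1', by rwa [List.getD_append _ _ _ _ h1'] at h2⟩
        · rw [show (linee ++ [r0 :: rest]).getD linee.length [] = r0 :: rest by simp, hlast] at h2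
          exact absurd (Option.some_injective _ h2).symm hv

-- extending all matching lines: the r0-bucket empties into the bucket of the new last element
lemma pv_inv_ext (linee : List (List Int)) (d : PySem.Dict Int (List Nat)) (hInv : pvINV linee d)
    (r0 : Int) (rest : List Int) (hr : rest ≠ []) :
    pvINV (linee.map (fun l => if l.getLast? = some r0 then l ++ rest else l))
      ((d.insert r0 ([] : List Nat)).insert (rest.getLast hr)
        (((d.insert r0 ([] : List Nat)).getD (rest.getLast hr) []) ++ d.getD r0 [])) := by
  set w := rest.getLast hr with hwdef
  set g : List Int → List Int := fun l => if l.getLast? = some r0 then l ++ rest else l with hgdef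
  have hw : rest.getLast? = some w := List.getLast?_eq_some_getLast hr
  have hchar := fun v => (hInv v).2
  have hnd := fun v => (hInv v).1
  have hltb : ∀ v i, i ∈ d.getD v [] → i < linee.length := fun v i h => ((hchar v i).mp h).1
  have hlastg : ∀ l : List Int, (g l).getLast? =
      if l.getLast? = some r0 then some w else l.getLast? := by
    intro l
    simp only [hgdef]
    by_cases hc : l.getLast? = some r0
    · rw [if_pos hc, if_pos hc, List.getLast?_append_of_ne_nil l hr, hw]
    · rw [if_neg hc, if_neg hc]
  have hgM : ∀ i, i < linee.length → (linee.map g).getD i [] = g (linee.getD i []) := by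
    intro i hi
    rw [List.getD_eq_getElem _ _ (by simpa using hi), List.getElem_map,
      List.getD_eq_getElem _ _ hi]
  have hd1 : ∀ x, (d.insert r0 ([] : List Nat)).getD x [] = if x = r0 then [] else d.getD x [] := by
    intro x; rw [PySem.Dict.getD_insert]
  have hd2 : ∀ x, ((d.insert r0 ([] : List Nat)).insert w
      (((d.insert r0 ([] : List Nat)).getD w []) ++ d.getD r0 [])).getD x []
      = if x = w then ((if w = r0 then [] else d.getD w []) ++ d.getD r0 [])
        else if x = r0 then [] else d.getD x [] := by
    intro x
    rw [PySem.Dict.getD_insert, hd1 w, hd1 x]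
  intro v
  constructor
  · rw [hd2 v]
    by_cases hvw : v = w
    · rw [if_pos hvw]
      by_cases hwr : w = r0
      · simp only [if_pos hwr, List.nil_append]
        exact hnd r0
      · rw [if_neg hwr]
        refine List.Nodup.append (hnd w) (hnd r0) ?_
        intro i hiw hir
        have h2 := ((hchar w i).mp hiw).2
        have h3 := ((hchar r0 i).mp hir).2
        rw [h2] at h3
        exact hwr (Option.some_injective _ h3)
    · rw [if_neg hvw]
      by_cases hvr : v = r0
      · rw [if_pos hvr]; exact List.nodup_nil
      · rw [if_neg hvr]; exact hnd v
  · intro i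
    rw [hd2 v]
    by_cases hilt : i < linee.length
    · have hget := hgM i hilt
      have hlast' := hlastg (linee.getD i [])
      by_cases hc : (linee.getD i []).getLast? = some r0
      · -- line i was extended: its new last is w
        have hidx : i ∈ d.getD r0 [] := (hchar r0 i).mpr ⟨hilt, hc⟩
        rw [if_pos hc] at hlast'
        by_cases hvw : v = w
        · subst hvw
          rw [if_pos rfl, List.mem_append]
          constructor
          · intro _; exact ⟨by simpa using hilt, by rw [hget, hlast']⟩
          · intro _; exact Or.inr hidx
        · rw [if_neg hvw]
          constructor
          · intro hi'
            by_cases hvr : v = r0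
            · rw [if_pos hvr] at hi'; simp at hi'
            · rw [if_neg hvr] at hi'
              have h2 := ((hchar v i).mp hi').2
              rw [hc] at h2
              exact absurd (Option.some_injective _ h2).symm hvr
          · rintro ⟨_, h2⟩
            rw [hget, hlast'] at h2
            exact absurd (Option.some_injective _ h2).symm hvw
      · -- line i unchanged
        have hnidx : i ∉ d.getD r0 [] := fun h => hc ((hchar r0 i).mp h).2
        rw [if_neg hc] at hlast'
        by_cases hvw : v = w
        · subst hvw
          rw [if_pos rfl, List.mem_append]
          constructor
          · rintro (hi' | hi')
            · by_cases hwr : w = r0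
              · rw [if_pos hwr] at hi'; simp at hi'
              · rw [if_neg hwr] at hi'
                exact ⟨by simpa using hilt, by rw [hget, hlast']; exact ((hchar w i).mp hi').2⟩
            · exact absurd hi' hnidx
          · rintro ⟨_, h2⟩
            rw [hget, hlast'] at h2
            by_cases hwr : w = r0
            · rw [hwr] at h2
              exact absurd h2 hc
            · exact Or.inl (by rw [if_neg hwr]; exact (hchar w i).mpr ⟨hilt, h2⟩)
        · rw [if_neg hvw]
          constructor
          · intro hi'
            by_cases hvr : v = r0
            · rw [if_pos hvr] at hi'; simp at hi'
            · rw [if_neg hvr] at hi'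
              exact ⟨by simpa using hilt, by rw [hget, hlast']; exact ((hchar v i).mp hi').2⟩
          · rintro ⟨_, h2⟩
            rw [hget, hlast'] at h2
            have hvr : v ≠ r0 := fun h => hc (h ▸ h2)
            rw [if_neg hvr]
            exact (hchar v i).mpr ⟨hilt, h2⟩
    · -- i out of range on both sides
      have hout : ∀ b : List Nat, (∀ j ∈ b, j < linee.length) → i ∉ b :=
        fun b hb h => hilt (hb i h)
      constructor
      · intro hi'
        by_cases hvw : v = w
        · rw [if_pos hvw, List.mem_append] at hi'
          rcases hi' with h | h
          · by_cases hwr : w = r0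
            · rw [if_pos hwr] at h; simp at h
            · rw [if_neg hwr] at h
              exact absurd h (hout _ (hltb w))
          · exact absurd h (hout _ (hltb r0))
        · rw [if_neg hvw] at hi'
          by_cases hvr : v = r0
          · rw [if_pos hvr] at hi'; simp at hi'
          · rw [if_neg hvr] at hi'
            exact absurd hi' (hout _ (hltb v))
      · rintro ⟨h1, _⟩
        exact absurd (by simpa using h1) hilt

-- main step lemma: one row preserves agreement of the line lists and the bucket invariant
lemma pv_step (riga : List Int) (linee : List (List Int)) (d : PySem.Dict Int (List Nat))
    (hInv : pvINV linee d) :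
    (pvStepB (linee, d) riga).1 = pvStepA linee riga ∧
    pvINV (pvStepA linee riga) (pvStepB (linee, d) riga).2 := by
  match riga with
  | [] =>
    refine ⟨?_, ?_⟩
    · simp [pvStepA, pvStepB]
    · simpa [pvStepA, pvStepB] using hInv
  | r0 :: rest =>
    have hchar := fun v => (hInv v).2
    have hnd := fun v => (hInv v).1
    have hlt : ∀ v i, i ∈ d.getD v [] → i < linee.length := fun v i h => ((hchar v i).mp h).1
    rw [pv_stepA_cons]
    by_cases hb : d.getD r0 [] ≠ []
    · -- some line matches
      rw [if_pos ((pv_found linee r0 d hInv).mpr hb)]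
      by_cases hr : rest ≠ []
      · -- real extension
        have hB : pvStepB (linee, d) (r0 :: rest) =
            ((d.getD r0 []).foldl (fun ls i => ls.set i (ls.getD i [] ++ rest)) linee,
             ((d.insert r0 ([] : List Nat)).insert (rest.getLast hr)
               (((d.insert r0 ([] : List Nat)).getD (rest.getLast hr) []) ++ d.getD r0 []))) := by
          simp only [pvStepB]
          rw [if_pos hb, dif_pos hr]
        rw [hB]
        refine ⟨?_, ?_⟩
        · show (d.getD r0 []).foldl (fun ls i => ls.set i (ls.getD i [] ++ rest)) linee = _
          apply pv_ext
          · rw [pv_set_length]; simp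
          · intro j
            rw [pv_set_getD rest (d.getD r0 []) linee (hnd r0) (hlt r0) j]
            by_cases hj : j < linee.length
            · have hget : (linee.map (fun l => if l.getLast? = some r0 then l ++ rest else l)).getD j []
                  = if (linee.getD j []).getLast? = some r0 then linee.getD j [] ++ rest
                    else linee.getD j [] := by
                rw [List.getD_eq_getElem _ _ (by simpa using hj), List.getElem_map,
                  List.getD_eq_getElem _ _ hj]
              rw [hget]
              by_cases hc : (linee.getD j []).getLast? = some r0
              · rw [if_pos ((hchar r0 j).mpr ⟨hj, hc⟩), if_pos hc]
              · rw [if_neg (fun h => hc ((hchar r0 j).mp h).2), if_neg hc]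
            · have hj' : j ∉ d.getD r0 [] := fun h => hj (hlt r0 j h)
              rw [if_neg hj', List.getD_eq_default _ _ (by omega),
                List.getD_eq_default _ _ (by simp; omega)]
        · exact pv_inv_ext linee d hInv r0 rest hr
      · -- rest = []: nothing changes
        rw [not_not] at hr
        subst hr
        have hB : pvStepB (linee, d) (r0 :: []) = (linee, d) := by
          simp only [pvStepB]
          rw [if_pos hb, dif_neg (by simp)]
        have hM : linee.map (fun l => if l.getLast? = some r0 then l ++ ([] : List Int) else l) = linee := by
          conv_rhs => rw [← List.map_id linee]
          apply List.map_congr_left; intro l _; split <;> simp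
        rw [hB, hM]
        exact ⟨rfl, hInv⟩
    · -- no match: append the new line
      rw [not_not] at hb
      rw [if_neg (by rw [pv_found linee r0 d hInv, hb]; simp)]
      have hM : linee.map (fun l => if l.getLast? = some r0 then l ++ rest else l) = linee := by
        conv_rhs => rw [← List.map_id linee]
        apply List.map_congr_left
        intro l hl
        obtain ⟨i, hi, rfl⟩ := List.mem_iff_getElem.mp hl
        rw [if_neg]
        · rfl
        · intro hc
          have : i ∈ d.getD r0 [] := (hchar r0 i).mpr ⟨hi, by rwa [List.getD_eq_getElem _ _ hi]⟩
          rw [hb] at this; simp at this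
      have hB : pvStepB (linee, d) (r0 :: rest) =
          (linee ++ [r0 :: rest],
           d.insert ((r0 :: rest).getLast (by simp))
             (d.getD ((r0 :: rest).getLast (by simp)) [] ++ [linee.length])) := by
        simp only [pvStepB]
        rw [if_neg (by rw [hb]; simp)]
      rw [hB, hM]
      exact ⟨rfl, pv_inv_append linee d hInv r0 rest⟩

lemma pv_fold (righe : List (List Int)) :
    ∀ (linee : List (List Int)) (d : PySem.Dict Int (List Nat)), pvINV linee d →
    (righe.foldl pvStepB (linee, d)).1 = righe.foldl pvStepA linee := by
  induction righe with
  | nil => intro linee d _; simp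
  | cons r rs ih =>
    intro linee d hInv
    have h := pv_step r linee d hInv
    have : pvStepB (linee, d) r = ((pvStepB (linee, d) r).1, (pvStepB (linee, d) r).2) := rfl
    rw [List.foldl_cons, List.foldl_cons, this, h.1]
    exact ih _ _ h.2

-- ===== VERDICT (by name: the statement is the Claim_ definition above) =====
theorem trovalinee_spec : Claim_equal_trovalinee := by
  intro righe _
  unfold Spec_trovalinee trovalinee trovalinee_alt
  rw [pv_fold]
  intro v
  constructor
  · simp [PySem.Dict.getD_empty]
  · intro i; simp [PySem.Dict.getD_empty]
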